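-- pv_equiv track=rewrite | github.com/onchainengineer/cowork | resources/inference/python/backends/pipeline_backend.py | compute_layer_assignment
-- ===== SOURCE A (Python) =====
-- from typing import Any, Dict, Generator, List, Optional, Tuple
--
-- def compute_layer_assignment(num_layers: int, world_size: int) -> List[Tuple[int, int]]:
--     """
--     Compute which layers each rank handles.
--
--     Returns a list of (start_layer, end_layer) tuples, one per rank.
--     Distributes layers as evenly as possible, with remainder layers
--     going to later ranks (they tend to be less memory-intensive).
--     """
--     base = num_layers // world_size
--     remainder = num_layers % world_size
--
--     assignments = []
--     start = 0
--     for rank in range(world_size):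
--         count = base + (1 if rank >= world_size - remainder else 0)
--         assignments.append((start, start + count))
--         start += count
--
--     return assignments
-- ===== SOURCE B (Python) =====
-- def compute_layer_assignment(num_layers, world_size):
--     base, remainder = divmod(num_layers, world_size)
--     threshold = world_size - remainder
--     return [(rank * base + max(0, rank - threshold),
--              (rank + 1) * base + max(0, rank + 1 - threshold))
--             for rank in range(world_size)]
-- ===== Notes on version B (the rewrite author's own statement) =====
-- stated objective: alternative
-- what changed: Replaced the running start accumulator with a comprehension computing each rank's range independently by a closed form (start = rank*base + max(0, rank-threshold)).
import Mathlib
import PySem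

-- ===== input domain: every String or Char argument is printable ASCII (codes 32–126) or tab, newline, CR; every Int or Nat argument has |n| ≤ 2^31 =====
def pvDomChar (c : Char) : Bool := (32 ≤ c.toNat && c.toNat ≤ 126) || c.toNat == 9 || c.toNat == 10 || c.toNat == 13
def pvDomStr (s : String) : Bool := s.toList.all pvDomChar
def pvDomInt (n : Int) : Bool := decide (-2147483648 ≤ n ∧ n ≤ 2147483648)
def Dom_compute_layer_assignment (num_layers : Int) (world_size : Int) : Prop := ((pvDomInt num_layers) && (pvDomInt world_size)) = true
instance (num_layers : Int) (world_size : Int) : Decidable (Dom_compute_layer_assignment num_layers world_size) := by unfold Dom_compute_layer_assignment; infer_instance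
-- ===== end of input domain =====

-- B replaces A's running-start accumulator loop with a per-rank closed form (alternative decomposition, same cost).

-- ===== PORT A =====
def compute_layer_assignment (num_layers : Int) (world_size : Int) : List (Int × Int) :=
  let base := PySem.Int.floordiv num_layers world_size
  let remainder := PySem.Int.mod num_layers world_size
  let p := (PySem.List.pyRange 0 world_size 1).foldl
    (fun (st : List (Int × Int) × Int) (rank : Int) =>
      let count := base + (if world_size - remainder ≤ rank then 1 else 0)
      (st.1 ++ [(st.2, st.2 + count)], st.2 + count))
    ([], 0)
  p.1

-- ===== PORT B =====
def compute_layer_assignment_alt (num_layers : Int) (world_size : Int) : List (Int × Int) :=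
  let base := PySem.Int.floordiv num_layers world_size
  let remainder := PySem.Int.mod num_layers world_size
  let threshold := world_size - remainder
  (PySem.List.pyRange 0 world_size 1).map
    (fun rank => (rank * base + max 0 (rank - threshold),
                  (rank + 1) * base + max 0 (rank + 1 - threshold)))

-- ===== PRECONDITION & SPEC =====
-- Pre_ excludes world_size = 0, where Python A (and B) raise ZeroDivisionError.
def Pre_compute_layer_assignment (num_layers : Int) (world_size : Int) : Prop := world_size ≠ 0
instance (num_layers : Int) (world_size : Int) : Decidable (Pre_compute_layer_assignment num_layers world_size) := by unfold Pre_compute_layer_assignment; infer_instance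
def pvWitness_compute_layer_assignment : Int × Int := (10, 3)
def Spec_compute_layer_assignment (num_layers : Int) (world_size : Int) (out : List (Int × Int)) : Prop := out = compute_layer_assignment_alt num_layers world_size
instance (num_layers : Int) (world_size : Int) (out : List (Int × Int)) : Decidable (Spec_compute_layer_assignment num_layers world_size out) := by unfold Spec_compute_layer_assignment; infer_instance

-- ===== CLAIM (what is proved, stated in full; the proofs are below) =====
def Claim_equal_compute_layer_assignment : Prop := ∀ (num_layers : Int) (world_size : Int), Dom_compute_layer_assignment num_layers world_size → Pre_compute_layer_assignment num_layers world_size → Spec_compute_layer_assignment num_layers world_size (compute_layer_assignment num_layers world_size)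

-- ===== LEMMAS AND PROOFS =====

-- closed-form start position of rank k
def pvS (base t : Int) (k : Nat) : Int := (k : Int) * base + max 0 ((k : Int) - t)

lemma pvS_succ (base t : Int) (k : Nat) :
    pvS base t (k + 1) = pvS base t k + (base + (if t ≤ (0 : Int) + (k : Int) then 1 else 0)) := by
  unfold pvS
  push_cast
  split_ifs with h <;> ring_nf <;> omega

lemma pv_loop_eq (base t : Int) (ht : 0 ≤ t) (n : Nat) :
    ((List.range n).foldl
      (fun (st : List (Int × Int) × Int) (k : Nat) =>
        (st.1 ++ [(st.2, st.2 + (base + if t ≤ (0 : Int) + (k : Int) then 1 else 0))],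
         st.2 + (base + if t ≤ (0 : Int) + (k : Int) then 1 else 0))) ([], 0))
    = ((List.range n).map (fun k => (pvS base t k, pvS base t (k + 1))), pvS base t n) := by
  induction n with
  | zero => simp [pvS]; omega
  | succ m ih =>
    rw [List.range_succ, List.foldl_append, List.map_append, ih]
    simp only [List.foldl_cons, List.foldl_nil]
    refine Prod.ext ?_ ?_
    · simp [pvS_succ base t m]
    · simpa using (pvS_succ base t m).symm

-- ===== VERDICT (by name: the statement is the Claim_ definition above) =====
theorem compute_layer_assignment_spec : Claim_equal_compute_layer_assignment := by
  intro nl ws _ hws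
  show compute_layer_assignment nl ws = compute_layer_assignment_alt nl ws
  by_cases hle : ws ≤ 0
  · have hnil : PySem.List.pyRange 0 ws 1 = [] := by
      rw [PySem.List.pyRange_one]
      have h0 : (ws - 0).toNat = 0 := by omega
      rw [h0]; simp
    simp [compute_layer_assignment, compute_layer_assignment_alt, hnil]
  · have hpos : 0 < ws := by omega
    have ht : 0 ≤ ws - PySem.Int.mod nl ws := by
      have hb := Int.emod_lt_of_pos nl hpos
      rw [PySem.Int.mod_eq_emod_of_pos hpos]
      omega
    simp only [compute_layer_assignment, compute_layer_assignment_alt, PySem.List.pyRange_one]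
    rw [List.foldl_map, List.map_map]
    rw [pv_loop_eq (PySem.Int.floordiv nl ws) (ws - PySem.Int.mod nl ws) ht]
    apply List.map_congr_left
    intro k _
    unfold pvS
    push_cast
    simp only [Function.comp_apply]
    ring_nf
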